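-- pv_equiv track=rewrite | github.com/azachor/Challenge1 | app.py | match_required_fields
-- ===== SOURCE A (Python) =====
-- def match_required_fields(df_columns):
--     logical_fields = {
--         "idx": ["idx"],
--         "label": ["label"],
--         "customerid": ["customerid"],
--         "transactionid": ["transactionid"],
--         "transactiondate": ["transactiondate"],
--         "productcategory": ["productcategory"],
--         "purchaseamount": ["purchaseamount"],
--         "customeragegroup": ["customeragegroup"],
--         "customergender": ["customergender"],
--         "customerregion": ["customerregion"],
--         "customersatisfaction": ["customersatisfaction"],
--         "retailchannel": ["retailchannel"],
--     }
--
--     matched = {}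
--     missing = []
--
--     for key, variants in logical_fields.items():
--         found = None
--         for col in df_columns:
--             if col.replace("_", "") == key:
--                 found = col
--                 break
--         if found:
--             matched[key] = found
--         else:
--             missing.append(key)
--
--     return matched, missing
-- ===== SOURCE B (Python) =====
-- LOGICAL_KEYS = [
--     "idx", "label", "customerid", "transactionid", "transactiondate",
--     "productcategory", "purchaseamount", "customeragegroup",
--     "customergender", "customerregion", "customersatisfaction",
--     "retailchannel",
-- ]
--
--
-- def match_required_fields(df_columns):
--     # Build an index once: normalized column name -> first column with that name.
--     index = {}
--     for col in df_columns:
--         index.setdefault(col.replace("_", ""), col)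
--
--     matched = {}
--     missing = []
--     for key in LOGICAL_KEYS:
--         if key in index:
--             matched[key] = index[key]
--         else:
--             missing.append(key)
--     return matched, missing
-- ===== Notes on version B (the rewrite author's own statement) =====
-- stated objective: faster
-- what changed: Builds a first-occurrence index of normalized column names in one pass and replaces A's per-key rescan of all columns with a single dict lookup per logical key.
import Mathlib
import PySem

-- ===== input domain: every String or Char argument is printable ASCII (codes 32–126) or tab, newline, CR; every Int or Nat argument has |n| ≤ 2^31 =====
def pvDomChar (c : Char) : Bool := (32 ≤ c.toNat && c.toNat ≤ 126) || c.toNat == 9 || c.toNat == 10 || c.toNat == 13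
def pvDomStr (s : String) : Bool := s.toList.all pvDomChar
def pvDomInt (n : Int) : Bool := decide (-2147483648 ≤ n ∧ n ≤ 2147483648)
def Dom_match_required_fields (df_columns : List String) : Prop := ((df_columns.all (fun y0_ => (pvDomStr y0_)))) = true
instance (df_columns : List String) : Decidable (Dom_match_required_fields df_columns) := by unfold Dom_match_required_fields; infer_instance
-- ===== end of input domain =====

-- B builds a first-occurrence index of normalized column names once, then looks each
-- logical key up, instead of A's rescan of all columns for every key (idiomatic; same result).

-- ===== PORT A =====
-- A's logical_fields dict: key -> variants (the variants list is never read by A's loop)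
def pvLogicalFields : List (String × List String) :=
  [("idx", ["idx"]), ("label", ["label"]), ("customerid", ["customerid"]),
   ("transactionid", ["transactionid"]), ("transactiondate", ["transactiondate"]),
   ("productcategory", ["productcategory"]), ("purchaseamount", ["purchaseamount"]),
   ("customeragegroup", ["customeragegroup"]), ("customergender", ["customergender"]),
   ("customerregion", ["customerregion"]), ("customersatisfaction", ["customersatisfaction"]),
   ("retailchannel", ["retailchannel"])]

-- A's inner loop: found = None; for col in df_columns: if col.replace("_","") == key: found = col; break
def pvFindCol (key : String) : List String → Option String
  | [] => none
  | c :: rest => if PySem.Str.replace c "_" "" = key then some c else pvFindCol key rest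

-- A's loop body over (matched, missing); 'if found:' is Python truthiness (non-None and non-empty)
def pvStepA (df_columns : List String) (st : PySem.Dict String String × List String)
    (kv : String × List String) : PySem.Dict String String × List String :=
  match pvFindCol kv.1 df_columns with
  | some c => if c ≠ "" then (st.1.insert kv.1 c, st.2) else (st.1, st.2 ++ [kv.1])
  | none => (st.1, st.2 ++ [kv.1])

def match_required_fields (df_columns : List String) : (List (String × String)) × List String :=
  let r := pvLogicalFields.foldl (pvStepA df_columns) (PySem.Dict.empty, [])
  (r.1.items, r.2)

-- ===== PORT B =====
def pvKeys : List String :=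
  ["idx", "label", "customerid", "transactionid", "transactiondate", "productcategory",
   "purchaseamount", "customeragegroup", "customergender", "customerregion",
   "customersatisfaction", "retailchannel"]

-- B's second loop body: if key in index: matched[key] = index[key] else missing.append(key)
def pvStepB (index : PySem.Dict String String) (st : PySem.Dict String String × List String)
    (key : String) : PySem.Dict String String × List String :=
  match index.get? key with
  | some c => (st.1.insert key c, st.2)
  | none => (st.1, st.2 ++ [key])

def match_required_fields_alt (df_columns : List String) : (List (String × String)) × List String :=
  let index := df_columns.foldl
    (fun d col => d.setdefault (PySem.Str.replace col "_" "") col) PySem.Dict.empty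
  let r := pvKeys.foldl (pvStepB index) (PySem.Dict.empty, [])
  (r.1.items, r.2)

-- ===== PRECONDITION & SPEC =====
def Spec_match_required_fields (df_columns : List String) (out : (List (String × String)) × List String) : Prop := out = match_required_fields_alt df_columns
instance (df_columns : List String) (out : (List (String × String)) × List String) : Decidable (Spec_match_required_fields df_columns out) := by unfold Spec_match_required_fields; infer_instance

-- ===== CLAIM (what is proved, stated in full; the proofs are below) =====
def Claim_equal_match_required_fields : Prop := ∀ (df_columns : List String), Dom_match_required_fields df_columns → Spec_match_required_fields df_columns (match_required_fields df_columns)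

-- ===== LEMMAS AND PROOFS =====

-- B's index lookup computes exactly A's first-match scan
theorem get_index (cols : List String) (k : String) : ∀ d : PySem.Dict String String,
    (cols.foldl (fun d col => d.setdefault (PySem.Str.replace col "_" "") col) d).get? k
      = ((d.get? k).map some).getD (pvFindCol k cols) := by
  induction cols with
  | nil => intro d; cases h : d.get? k <;> simp [pvFindCol, h]
  | cons c rest ih =>
    intro d
    simp only [List.foldl_cons, ih, pvFindCol]
    by_cases h : PySem.Str.replace c "_" "" = k
    · rw [h, PySem.Dict.get?_setdefault_self]
      cases d.get? k <;> simp
    · rw [PySem.Dict.get?_setdefault_of_ne d c (fun he => h he.symm)]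
      simp [h]

-- a matched column is non-empty whenever the key is non-empty (so Python's 'if found:' fires)
theorem findCol_ne_empty (k : String) (hk : k ≠ "") :
    ∀ cols c, pvFindCol k cols = some c → c ≠ "" := by
  intro cols
  induction cols with
  | nil => intro c h; simp [pvFindCol] at h
  | cons x rest ih =>
    intro c h
    by_cases hx : PySem.Str.replace x "_" "" = k
    · simp [pvFindCol, hx] at h
      subst h
      intro hc; rw [hc] at hx
      exact hk (hx.symm.trans (by decide))
    · simp [pvFindCol, hx] at h
      exact ih c h

theorem step_eq (cols : List String) (index : PySem.Dict String String)
    (hidx : ∀ k, index.get? k = pvFindCol k cols)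
    (k : String) (hk : k ≠ "") (vs : List String) (st : PySem.Dict String String × List String) :
    pvStepA cols st (k, vs) = pvStepB index st k := by
  unfold pvStepA pvStepB
  rw [hidx]
  cases h : pvFindCol k cols with
  | none => rfl
  | some c => simp [findCol_ne_empty k hk cols c h]

theorem fold_eq (cols : List String) (index : PySem.Dict String String)
    (hidx : ∀ k, index.get? k = pvFindCol k cols) :
    ∀ (ks : List (String × List String)) (st : PySem.Dict String String × List String),
      (∀ p ∈ ks, p.1 ≠ "") →
      ks.foldl (pvStepA cols) st = (ks.map (·.1)).foldl (pvStepB index) st := by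
  intro ks
  induction ks with
  | nil => intro st _; rfl
  | cons p rest ih =>
    intro st hne
    simp only [List.foldl_cons, List.map_cons]
    rw [show pvStepA cols st p = pvStepB index st p.1 from
      step_eq cols index hidx p.1 (hne p (by simp)) p.2 st]
    exact ih _ (fun q hq => hne q (by simp [hq]))

-- ===== VERDICT (by name: the statement is the Claim_ definition above) =====
theorem match_required_fields_spec : Claim_equal_match_required_fields := by
  intro cols _
  unfold Spec_match_required_fields match_required_fields match_required_fields_alt
  have hidx : ∀ k, (cols.foldl
      (fun d col => d.setdefault (PySem.Str.replace col "_" "") col)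
      PySem.Dict.empty).get? k = pvFindCol k cols := by
    intro k; rw [get_index]; simp
  rw [fold_eq cols _ hidx pvLogicalFields (PySem.Dict.empty, []) (by decide)]
  rfl
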